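-- pv_equiv track=rewrite | github.com/desaxce/euler | src/hallway3.py | count_p
-- ===== SOURCE A (Python) =====
-- def count_p(N, l):
-- 	out = list()
-- 	sieve = [True] * (N+1)
-- 	for p in range(2, N+1):
-- 		if sieve[p]:
-- 			out.append(p)
-- 			for i in range(p, N+1, p):
-- 				sieve[i] = False
-- 	result = 0
-- 	for p in out:
-- 		if p%4==l:
-- 			result+=1
-- 	return result
-- ===== SOURCE B (Python) =====
-- def count_p(N, l):
--     def is_prime(n):
--         if n < 2:
--             return False
--         d = 2
--         while d * d <= n:
--             if n % d == 0:
--                 return False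
--             d += 1
--         return True
--     return sum(1 for p in range(2, N + 1) if is_prime(p) and p % 4 == l)
-- ===== Notes on version B (the rewrite author's own statement) =====
-- stated objective: simpler
-- what changed: Replaces the boolean sieve table plus collected prime list with per-number trial division (divisors up to sqrt) and a single counting pass.
import Mathlib
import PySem

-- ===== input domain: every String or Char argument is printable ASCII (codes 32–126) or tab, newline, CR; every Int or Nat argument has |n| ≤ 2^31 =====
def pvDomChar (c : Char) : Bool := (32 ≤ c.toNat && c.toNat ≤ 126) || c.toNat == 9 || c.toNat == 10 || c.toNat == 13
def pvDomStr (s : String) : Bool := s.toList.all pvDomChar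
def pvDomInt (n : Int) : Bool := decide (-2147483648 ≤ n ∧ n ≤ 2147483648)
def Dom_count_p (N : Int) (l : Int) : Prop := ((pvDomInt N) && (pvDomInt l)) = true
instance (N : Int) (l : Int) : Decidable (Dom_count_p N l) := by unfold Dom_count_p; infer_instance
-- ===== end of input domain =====

-- B replaces A's boolean sieve table and collected prime list by per-number trial
-- division up to the square root, counted in a single pass (simpler, no table).

-- ===== PORT A =====
-- inner loop 'for i in range(p, N+1, p): sieve[i] = False'
def pvMark (N : Int) (sv : List Bool) (p : Int) : List Bool :=
  (PySem.List.pyRange p (N + 1) p).foldl (fun s i => PySem.List.pySetD s i false) sv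

-- body of 'for p in range(2, N+1): if sieve[p]: out.append(p); <mark multiples>'
def pvStep (N : Int) (s : List Int × List Bool) (p : Int) : List Int × List Bool :=
  if PySem.List.pyGetD s.2 p false then (s.1 ++ [p], pvMark N s.2 p) else s

def count_p (N : Int) (l : Int) : Int :=
  ((PySem.List.pyRange 2 (N + 1) 1).foldl (pvStep N)
      ([], List.replicate (N + 1).toNat true)).1.foldl
    (fun result p => if PySem.Int.mod p 4 = l then result + 1 else result) 0

-- ===== PORT B =====
-- 'while d*d <= n: if n % d == 0: return False; d += 1'
def pvIsPrimeLoop (n : Int) (d : Int) : Bool :=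
  if d * d ≤ n then
    (if PySem.Int.mod n d = 0 then false else pvIsPrimeLoop n (d + 1))
  else true
termination_by (n + 1 - d).toNat
decreasing_by
  have hdd : d ≤ d * d := by
    rcases (by omega : d ≤ 0 ∨ 1 ≤ d) with h | h
    · nlinarith [mul_self_nonneg d]
    · nlinarith
  omega

def pvIsPrime (n : Int) : Bool :=
  if n < 2 then false else pvIsPrimeLoop n 2

def count_p_alt (N : Int) (l : Int) : Int :=
  (PySem.List.pyRange 2 (N + 1) 1).foldl
    (fun acc p => if pvIsPrime p ∧ PySem.Int.mod p 4 = l then acc + 1 else acc) 0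

-- ===== PRECONDITION & SPEC =====
def Spec_count_p (N : Int) (l : Int) (out : Int) : Prop := out = count_p_alt N l
instance (N : Int) (l : Int) (out : Int) : Decidable (Spec_count_p N l out) := by unfold Spec_count_p; infer_instance

-- ===== CLAIM (what is proved, stated in full; the proofs are below) =====
def Claim_equal_count_p : Prop := ∀ (N : Int) (l : Int), Dom_count_p N l → Spec_count_p N l (count_p N l)

-- ===== LEMMAS AND PROOFS =====

-- d ∣ n over Int vs Python's '%'
theorem pvMod_eq_zero_iff (n d : Int) : PySem.Int.mod n d = 0 ↔ d ∣ n := by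
  unfold PySem.Int.mod
  exact Iff.symm Int.dvd_iff_fmod_eq_zero

-- trial-division loop: true iff no divisor e ≥ d with e*e ≤ n
theorem pvIsPrimeLoop_iff_aux (n : Int) :
    ∀ (fuel : Nat) (d : Int), 0 < d → (n + 1 - d).toNat ≤ fuel →
      (pvIsPrimeLoop n d = true ↔ ∀ e : Int, d ≤ e → e * e ≤ n → ¬ e ∣ n) := by
  intro fuel
  induction fuel with
  | zero =>
    intro d hd hf
    have hd1 : n + 1 ≤ d := by omega
    have hdn : ¬ d * d ≤ n := by nlinarith
    rw [pvIsPrimeLoop, if_neg hdn]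
    constructor
    · intro _ e he hee _
      have h1 : d * d ≤ e * e := mul_le_mul he he hd.le (hd.le.trans he)
      exact hdn (h1.trans hee)
    · intro _; rfl
  | succ fuel ih =>
    intro d hd hf
    rw [pvIsPrimeLoop]
    by_cases hdn : d * d ≤ n
    · rw [if_pos hdn]
      by_cases hm : PySem.Int.mod n d = 0
      · rw [if_pos hm]
        simp only [Bool.false_eq_true, false_iff]
        push_neg
        exact ⟨d, le_rfl, hdn, (pvMod_eq_zero_iff n d).mp hm⟩
      · rw [if_neg hm]
        rw [ih (d + 1) (by omega) (by omega)]
        constructor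
        · intro h e he hee hdvd
          rcases eq_or_lt_of_le he with heq | hlt
          · subst heq
            exact hm ((pvMod_eq_zero_iff n d).mpr hdvd)
          · exact h e (by omega) hee hdvd
        · intro h e he hee hdvd
          exact h e (by omega) hee hdvd
    · rw [if_neg hdn]
      constructor
      · intro _ e he hee _
        have h1 : d * d ≤ e * e := mul_le_mul he he hd.le (hd.le.trans he)
        exact hdn (h1.trans hee)
      · intro _; rfl

theorem pvIsPrimeLoop_iff (n d : Int) (hd : 0 < d) :
    pvIsPrimeLoop n d = true ↔ ∀ e : Int, d ≤ e → e * e ≤ n → ¬ e ∣ n :=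
  pvIsPrimeLoop_iff_aux n (n + 1 - d).toNat d hd le_rfl

theorem pvIsPrime_iff (n : Int) (h2 : 2 ≤ n) :
    (pvIsPrime n = true ↔ Nat.Prime n.toNat) := by
  have hn : ((n.toNat : Int)) = n := Int.toNat_of_nonneg (by omega)
  unfold pvIsPrime
  rw [if_neg (by omega), pvIsPrimeLoop_iff n 2 (by omega)]
  constructor
  · intro h
    by_contra hnp
    have h1 : n.toNat ≠ 1 := by omega
    have hmp : Nat.Prime n.toNat.minFac := Nat.minFac_prime h1
    have hm2 : 2 ≤ n.toNat.minFac := hmp.two_le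
    have hsq : n.toNat.minFac * n.toNat.minFac ≤ n.toNat := by
      have := Nat.minFac_sq_le_self (n := n.toNat) (by omega) hnp
      nlinarith [this]
    have hdvd : (n.toNat.minFac : Int) ∣ n := by
      rw [← hn]; exact_mod_cast Nat.minFac_dvd n.toNat
    refine h (n.toNat.minFac : Int) (by exact_mod_cast hm2) ?_ hdvd
    have hcast : ((n.toNat.minFac : Int)) * (n.toNat.minFac : Int) ≤ (n.toNat : Int) := by
      exact_mod_cast hsq
    rwa [hn] at hcast
  · intro hp e he hee hdvd
    have he0 : ((e.toNat : Int)) = e := Int.toNat_of_nonneg (by omega)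
    have hdn : e.toNat ∣ n.toNat := by
      rw [← Int.natCast_dvd_natCast, he0, hn]; exact hdvd
    rcases (Nat.Prime.eq_one_or_self_of_dvd hp e.toNat hdn) with h1 | hself
    · omega
    · have : e = n := by omega
      subst this
      nlinarith

-- counting fold = countP
theorem pvFoldl_count (c : Int → Prop) [DecidablePred c] :
    ∀ (xs : List Int) (a : Int),
      xs.foldl (fun r p => if c p then r + 1 else r) a
        = a + (xs.countP (fun p => decide (c p)) : Int) := by
  intro xs
  induction xs with
  | nil => intro a; simp
  | cons x xs ih =>
    intro a
    by_cases h : c x <;> simp [List.countP_cons, h, ih] <;> push_cast <;> ring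

-- the set-marking fold, characterised
theorem pvFoldl_set_spec :
    ∀ (js : List Int) (sv : List Bool),
      (∀ j ∈ js, ∃ jn : Nat, j = (jn : Int) ∧ jn < sv.length) →
      (js.foldl (fun s i => PySem.List.pySetD s i false) sv).length = sv.length ∧
      ∀ m : Nat,
        PySem.List.pyGetD (js.foldl (fun s i => PySem.List.pySetD s i false) sv) (m : Int) true
          = if (m : Int) ∈ js then false else PySem.List.pyGetD sv (m : Int) true := by
  intro js
  induction js with
  | nil => intro sv _; simp
  | cons j js ih =>
    intro sv hjs
    obtain ⟨jn, rfl, hlt⟩ := hjs j (List.mem_cons_self)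
    have hlen : (PySem.List.pySetD sv (jn : Int) false).length = sv.length := by
      simp [PySem.List.length_pySetD]
    have hrec := ih (PySem.List.pySetD sv (jn : Int) false)
      (by intro j hj
          obtain ⟨kn, rfl, hk⟩ := hjs j (List.mem_cons_of_mem _ hj)
          exact ⟨kn, rfl, by omega⟩)
    refine ⟨by simp only [List.foldl_cons]; rw [hrec.1, hlen], ?_⟩
    intro m
    simp only [List.foldl_cons]
    rw [hrec.2 m]
    by_cases hmem : (m : Int) ∈ js
    · simp [hmem]
    · rw [PySem.List.pyGetD_pySetD_natCast sv jn m false true hlt]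
      by_cases hmj : m = jn
      · subst hmj; simp [hmem]
      · have : ¬ ((m : Int) = (jn : Int)) := by exact_mod_cast hmj
        simp [hmem, hmj, this, List.mem_cons]

-- marking the multiples of p
theorem pvMark_spec (N p : Int) (sv : List Bool) (hp : 2 ≤ p)
    (hpN : p ≤ N) (hlen : sv.length = (N + 1).toNat) :
    (pvMark N sv p).length = sv.length ∧
    ∀ m : Nat, m < sv.length →
      PySem.List.pyGetD (pvMark N sv p) (m : Int) true
        = if p ∣ (m : Int) ∧ p ≤ (m : Int) then false
          else PySem.List.pyGetD sv (m : Int) true := by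
  have hmem : ∀ x : Int, x ∈ PySem.List.pyRange p (N + 1) p ↔ p ≤ x ∧ x < N + 1 ∧ p ∣ x - p := by
    intro x; exact PySem.List.mem_pyRange_iff_of_pos (by omega) x
  have hspec := pvFoldl_set_spec (PySem.List.pyRange p (N + 1) p) sv
    (by intro j hj
        rw [hmem j] at hj
        refine ⟨j.toNat, by omega, by omega⟩)
  unfold pvMark
  refine ⟨hspec.1, ?_⟩
  intro m hm
  rw [hspec.2 m]
  have hdvd_iff : p ∣ (m : Int) - p ↔ p ∣ (m : Int) := by
    constructor
    · intro h; simpa using dvd_add h (dvd_refl p)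
    · intro h; exact dvd_sub h (dvd_refl p)
  have hmlt : (m : Int) < N + 1 := by omega
  by_cases hc : p ∣ (m : Int) ∧ p ≤ (m : Int)
  · rw [if_pos ((hmem (m : Int)).mpr ⟨hc.2, hmlt, hdvd_iff.mpr hc.1⟩), if_pos hc]
  · rw [if_neg (fun hx => hc ⟨hdvd_iff.mp ((hmem (m : Int)).mp hx).2.2,
      ((hmem (m : Int)).mp hx).1⟩), if_neg hc]

-- the sieve loop collects exactly the primes of [k, N] (trial-division sense)
theorem pvSieve_fold (N : Int) :
    ∀ (fuel : Nat) (k : Int) (out : List Int) (sv : List Bool),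
      2 ≤ k → (N + 1 - k).toNat ≤ fuel →
      sv.length = (N + 1).toNat →
      (∀ m : Nat, m < sv.length →
        (PySem.List.pyGetD sv (m : Int) true = true ↔
          ¬ (2 ≤ m ∧ ((m.minFac : Int) < k)))) →
      ((PySem.List.pyRange k (N + 1) 1).foldl (pvStep N) (out, sv)).1
        = out ++ (PySem.List.pyRange k (N + 1) 1).filter (fun p => pvIsPrime p) := by
  intro fuel
  induction fuel with
  | zero =>
    intro k out sv hk hf _ _
    rw [PySem.List.pyRange_one_eq_nil (by omega)]
    simp
  | succ fuel ih =>
    intro k out sv hk hf hlen hInv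
    by_cases hkN : N + 1 ≤ k
    · rw [PySem.List.pyRange_one_eq_nil (by omega)]; simp
    · have hkN' : k ≤ N := by omega
      rw [PySem.List.pyRange_one_cons (by omega)]
      simp only [List.foldl_cons, List.filter_cons]
      have hkt : k.toNat < sv.length := by omega
      have hread : PySem.List.pyGetD sv k false = sv[k.toNat] :=
        PySem.List.pyGetD_eq_getElem sv false (by omega) (by omega)
      have hread' : PySem.List.pyGetD sv ((k.toNat : Nat) : Int) true = sv[k.toNat] := by
        rw [PySem.List.pyGetD_eq_getElem sv true (by omega) (by omega)]
        simp only [Int.toNat_natCast]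
      have hiff := hInv k.toNat hkt
      rw [hread'] at hiff
      have hk2 : 2 ≤ k.toNat := by omega
      have hprime_iff : (sv[k.toNat] = true) ↔ Nat.Prime k.toNat := by
        rw [hiff, Nat.prime_def_minFac]
        have hle : k.toNat.minFac ≤ k.toNat := Nat.minFac_le (by omega)
        constructor
        · intro h
          refine ⟨hk2, ?_⟩
          have : ¬ ((k.toNat.minFac : Int) < k) := by tauto
          omega
        · intro ⟨_, h⟩
          rintro ⟨_, hlt⟩
          omega
      have hpv : pvIsPrime k = sv[k.toNat] := by
        have h1 := pvIsPrime_iff k (by omega)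
        have h2 : (k : Int).toNat = k.toNat := rfl
        cases hb : sv[k.toNat] <;> cases hq : pvIsPrime k <;> simp_all
      have hstep : pvStep N (out, sv) k
          = if sv[k.toNat] = true then (out ++ [k], pvMark N sv k) else (out, sv) := by
        unfold pvStep; rw [hread]
      rw [hstep, hpv]
      cases hb : sv[k.toNat] with
      | false =>
        simp only [Bool.false_eq_true, if_false]
        have hnp : ¬ Nat.Prime k.toNat := by rw [← hprime_iff, hb]; simp
        exact ih (k + 1) out sv (by omega) (by omega) hlen
          (by intro m hm
              rw [hInv m hm]
              constructor
              · rintro hno ⟨hm2, hlt⟩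
                rcases lt_or_eq_of_le (by omega : (m.minFac : Int) ≤ k) with h | h
                · exact hno ⟨hm2, h⟩
                · have : m.minFac = k.toNat := by omega
                  exact hnp (this ▸ Nat.minFac_prime (by omega))
              · rintro hno ⟨hm2, hlt⟩
                exact hno ⟨hm2, by omega⟩)
      | true =>
        simp only [if_true]
        have hkp : Nat.Prime k.toNat := hprime_iff.mp hb
        have hmark := pvMark_spec N k sv (by omega) hkN' hlen
        rw [ih (k + 1) (out ++ [k]) (pvMark N sv k) (by omega) (by omega)
          (by rw [hmark.1, hlen])
          (by intro m hm
              rw [hmark.1] at hm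
              rw [hmark.2 m hm]
              by_cases hc : k ∣ (m : Int) ∧ k ≤ (m : Int)
              · rw [if_pos hc]
                have hdn : k.toNat ∣ m := by
                  have hkd : ((k.toNat : Int)) ∣ (m : Int) := by
                    rw [Int.toNat_of_nonneg (by omega : (0:Int) ≤ k)]
                    exact hc.1
                  exact_mod_cast hkd
                have hle : m.minFac ≤ k.toNat := Nat.minFac_le_of_dvd hk2 hdn
                obtain ⟨hc1, hc2⟩ := hc
                simp only [Bool.false_eq_true, false_iff, not_not]
                exact ⟨by omega, by omega⟩
              · rw [if_neg hc, hInv m hm]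
                constructor
                · rintro hno ⟨hm2, hlt⟩
                  rcases lt_or_eq_of_le (by omega : (m.minFac : Int) ≤ k) with h | h
                  · exact hno ⟨hm2, h⟩
                  · exfalso
                    have hmf : m.minFac = k.toNat := by omega
                    have hdvd : k ∣ (m : Int) := by
                      have : (m.minFac : Int) ∣ (m : Int) := by exact_mod_cast Nat.minFac_dvd m
                      rwa [h] at this
                    have hlem : m.minFac ≤ m := Nat.minFac_le (by omega)
                    exact hc ⟨hdvd, by omega⟩
                · rintro hno ⟨hm2, hlt⟩
                  exact hno ⟨hm2, by omega⟩)]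
        simp

-- ===== VERDICT (by name: the statement is the Claim_ definition above) =====
theorem count_p_spec : Claim_equal_count_p := by
  unfold Claim_equal_count_p Spec_count_p
  intro N l _
  by_cases hN : N + 1 ≤ 2
  · rw [count_p, count_p_alt, PySem.List.pyRange_one_eq_nil hN]
    simp
  · have hout := pvSieve_fold N (N + 1 - 2).toNat 2 [] (List.replicate (N + 1).toNat true)
      (by omega) le_rfl (by simp)
      (by intro m hm
          rw [PySem.List.pyGetD_eq_getElem _ true (by omega) (by omega)]
          simp only [List.getElem_replicate, true_iff]
          rintro ⟨hm2, hlt⟩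
          have := (Nat.minFac_prime (by omega : m ≠ 1)).two_le
          omega)
    rw [count_p, count_p_alt, hout]
    simp only [List.nil_append]
    rw [pvFoldl_count (fun p => PySem.Int.mod p 4 = l),
        pvFoldl_count (fun p => pvIsPrime p = true ∧ PySem.Int.mod p 4 = l)]
    simp only [Int.zero_add, zero_add]
    rw [List.countP_filter]
    congr 1
    norm_cast
    apply List.countP_congr
    intro x _
    cases hx : pvIsPrime x <;> simp [hx]
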